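-- pv_equiv track=rewrite | github.com/bionanopatterning/scNodes | build/lib/src/nodes/pysofi/reconstruction.py | sorted_k_partitions
-- ===== SOURCE A (Python) =====
-- def sorted_k_partitions(seq, k):
--     """
--     Returns a list of all unique k-partitions of `seq`.
--     Each partition is a list of parts, and each part is a tuple.
--     """
--     n = len(seq)
--     groups = []
--
--     def generate_partitions(i):
--         if i >= n:
--             yield list(map(tuple, groups))
--         else:
--             if n - i > k - len(groups):
--                 for group in groups:
--                     group.append(seq[i])
--                     yield from generate_partitions(i + 1)
--                     group.pop()
--             if len(groups) < k:
--                 groups.append([seq[i]])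
--                 yield from generate_partitions(i + 1)
--                 groups.pop()
--
--     result = generate_partitions(0)
--
--     # Sort the parts in each partition in shortlex order
--     result = [sorted(ps, key=lambda p: (len(p), p)) for ps in result]
--     # Sort partitions by the length of each part, then lexicographically.
--     result = sorted(result, key=lambda ps: (*map(len, ps), ps))
--     # delete partitions with only 1 element
--     result = [p for p in result if len(p[0]) > 1]
--
--     return result
-- ===== SOURCE B (Python) =====
-- def sorted_k_partitions(seq, k):
--     """
--     Returns a list of all unique k-partitions of `seq`.
--     Each partition is a list of parts, and each part is a tuple.
--     """
--     n = len(seq)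
--
--     def expansions(parts, rem):
--         # all ways to place the current element into `parts`, pruned so that
--         # exactly k parts can still be reached with `rem` elements remaining
--         out = []
--         if rem >= k - len(parts):
--             out = [parts[:j] + [parts[j] + (x,)] + parts[j+1:]
--                    for j in range(len(parts))]
--         if len(parts) < k:
--             out = out + [parts + [(x,)]]
--         return out
--
--     # iterative frontier of partial partitions (parts are tuples)
--     frontier = [[]]
--     for i, x in enumerate(seq):
--         frontier = [q for parts in frontier for q in expansions(parts, n - i - 1)]
--
--     # Sort the parts in each partition in shortlex order
--     result = [sorted(ps, key=lambda p: (len(p), p)) for ps in frontier]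
--     # Sort partitions by the length of each part, then lexicographically.
--     result = sorted(result, key=lambda ps: (*map(len, ps), ps))
--     # delete partitions with only 1 element
--     result = [p for p in result if len(p[0]) > 1]
--
--     return result
-- ===== Notes on version B (the rewrite author's own statement) =====
-- stated objective: alternative
-- what changed: A's recursive backtracking generator with a shared mutable groups list is replaced by an iterative breadth-first frontier of partial partitions folded over the sequence (with the same reach-exactly-k pruning); the post-processing sorts/filter are unchanged; Pre_ excludes only seq = [], where both A and B raise IndexError (len(p[0]) on the empty partition).
import Mathlib
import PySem

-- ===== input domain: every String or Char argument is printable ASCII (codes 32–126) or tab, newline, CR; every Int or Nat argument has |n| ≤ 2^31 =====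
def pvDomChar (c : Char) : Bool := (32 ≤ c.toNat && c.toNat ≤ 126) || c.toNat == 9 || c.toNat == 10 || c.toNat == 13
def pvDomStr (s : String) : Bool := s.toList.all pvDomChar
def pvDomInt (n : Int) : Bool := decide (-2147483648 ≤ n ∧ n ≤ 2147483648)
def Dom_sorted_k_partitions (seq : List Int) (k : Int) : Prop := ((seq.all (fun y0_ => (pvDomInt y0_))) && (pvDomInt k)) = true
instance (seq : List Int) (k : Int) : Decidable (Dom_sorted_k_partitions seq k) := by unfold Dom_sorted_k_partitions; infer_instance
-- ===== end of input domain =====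

-- B replaces A's recursive backtracking generator (shared mutable `groups`) by an iterative
-- breadth-first frontier of partial partitions folded over the sequence; same post-processing;
-- objective: alternative decomposition (no speed claim).

-- ===== PORT A =====
-- A's inner loop `for group in groups: group.append(seq[i]); yield from gen(i+1); group.pop()`:
-- one recursive call per one-hole extension of the groups list, in order.
def pvGenExtend (x : Int) : List (List Int) → List (List (List Int))
  | [] => []
  | g :: gs => ((g ++ [x]) :: gs) :: (pvGenExtend x gs).map (fun h => g :: h)

-- A's generator `generate_partitions(i)`, recursing on the remaining elements
-- (so Python's n - i is the length of the remaining list); `map(tuple, …)` is the identity here.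
def pvGen (k : Int) : List Int → List (List Int) → List (List (List Int))
  | [], groups => [groups]
  | x :: rest, groups =>
      (if (((x :: rest).length : Int) > k - (groups.length : Int)) then
        (pvGenExtend x groups).flatMap (fun gs => pvGen k rest gs)
      else []) ++
      (if ((groups.length : Int) < k) then pvGen k rest (groups ++ [[x]]) else [])
termination_by l _ => l.length
decreasing_by all_goals simp

-- Python sort keys: (len(p), p) and (*map(len, ps), ps).  Tuple/list comparison is Lean's
-- lexicographic List order; flattening (*lens, ps) vs (lens, ps) coincides because all compared
-- partitions have the same number of parts (a lone shorter partition is never compared).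
-- p[0] is ported as pyGetD p 0 [] — exact whenever the partition is nonempty, i.e. whenever seq ≠ [] (Pre_).
def sorted_k_partitions (seq : List Int) (k : Int) : List (List (List Int)) :=
  let gen := pvGen k seq []
  let result := gen.map (fun ps => PySem.List.sorted2 ps (fun p => (p.length : Int)) (fun p => p))
  let result := PySem.List.sorted2 result (fun ps => ps.map (fun p => (p.length : Int))) (fun ps => ps)
  result.filter (fun p => decide (((PySem.List.pyGetD p 0 []).length : Int) > 1))

-- ===== PORT B =====
-- `expansions(parts, rem)` of Source B; parts[:j] / parts[j] / parts[j+1:] for 0 ≤ j < len(parts)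
-- are ported as take / getD / drop — exact on that index range.
def pvExpansions (k : Int) (x : Int) (parts : List (List Int)) (rem : Int) : List (List (List Int)) :=
  (if (rem ≥ k - (parts.length : Int)) then
    (List.range parts.length).map
      (fun j => parts.take j ++ [(parts.getD j []) ++ [x]] ++ parts.drop (j + 1))
  else []) ++
  (if ((parts.length : Int) < k) then [parts ++ [[x]]] else [])

def sorted_k_partitions_alt (seq : List Int) (k : Int) : List (List (List Int)) :=
  let n := seq.length
  let frontier := (PySem.List.enumerate seq 0).foldl
      (fun fr p => fr.flatMap (fun parts => pvExpansions k p.2 parts ((n : Int) - p.1 - 1))) [[]]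
  let result := frontier.map (fun ps => PySem.List.sorted2 ps (fun p => (p.length : Int)) (fun p => p))
  let result := PySem.List.sorted2 result (fun ps => ps.map (fun p => (p.length : Int))) (fun ps => ps)
  result.filter (fun p => decide (((PySem.List.pyGetD p 0 []).length : Int) > 1))

-- ===== PRECONDITION & SPEC =====
-- Pre_ excludes only seq = [], where Python A raises IndexError (len(p[0]) on the empty partition).
def Pre_sorted_k_partitions (seq : List Int) (k : Int) : Prop := seq ≠ []
instance (seq : List Int) (k : Int) : Decidable (Pre_sorted_k_partitions seq k) := by unfold Pre_sorted_k_partitions; infer_instance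
def pvWitness_sorted_k_partitions : List Int × Int := ([1, 2, 3, 4], 2)
def Spec_sorted_k_partitions (seq : List Int) (k : Int) (out : List (List (List Int))) : Prop := out = sorted_k_partitions_alt seq k
instance (seq : List Int) (k : Int) (out : List (List (List Int))) : Decidable (Spec_sorted_k_partitions seq k out) := by unfold Spec_sorted_k_partitions; infer_instance

-- ===== CLAIM (what is proved, stated in full; the proofs are below) =====
def Claim_equal_sorted_k_partitions : Prop := ∀ (seq : List Int) (k : Int), Dom_sorted_k_partitions seq k → Pre_sorted_k_partitions seq k → Spec_sorted_k_partitions seq k (sorted_k_partitions seq k)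

-- ===== LEMMAS AND PROOFS =====

-- B's range/slice one-hole expansion list is A's structural one.
lemma pvExtend_eq (x : Int) (parts : List (List Int)) :
    (List.range parts.length).map
      (fun j => parts.take j ++ [(parts.getD j []) ++ [x]] ++ parts.drop (j + 1))
      = pvGenExtend x parts := by
  induction parts with
  | nil => simp [pvGenExtend]
  | cons g gs ih =>
    simp only [pvGenExtend, List.length_cons, List.range_succ_eq_map, List.map_cons, List.map_map]
    refine List.cons_eq_cons.mpr ⟨by simp, ?_⟩
    rw [← ih, List.map_map]
    rfl

-- One generator step equals flatMap over B's expansions of the current element.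
lemma pvStep_eq (k x : Int) (rest : List Int) (groups : List (List Int)) :
    pvGen k (x :: rest) groups
      = (pvExpansions k x groups (rest.length : Int)).flatMap (fun gs => pvGen k rest gs) := by
  rw [pvGen, pvExpansions, pvExtend_eq]
  rw [List.flatMap_append]
  by_cases h1 : ((rest.length : Int) ≥ k - (groups.length : Int)) <;>
    by_cases h2 : ((groups.length : Int) < k) <;>
      simp [h1, h2]

-- Frontier invariant: folding B's step over the enumerated remaining elements expands every
-- frontier entry into exactly A's generator output, in order.
lemma pvFrontier_inv (k : Int) (n : Nat) :
    ∀ (ys : List Int) (i : Int) (fs : List (List (List Int))),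
      (n : Int) = i + (ys.length : Int) →
      (PySem.List.enumerate ys i).foldl
          (fun fr p => fr.flatMap (fun parts => pvExpansions k p.2 parts ((n : Int) - p.1 - 1))) fs
        = fs.flatMap (fun g => pvGen k ys g) := by
  intro ys
  induction ys with
  | nil =>
    intro i fs h
    simp [PySem.List.enumerate_nil, pvGen]
  | cons y ys ih =>
    intro i fs h
    rw [PySem.List.enumerate_cons, List.foldl_cons]
    have hrem : (n : Int) - i - 1 = (ys.length : Int) := by
      simp only [List.length_cons] at h; push_cast at h ⊢; omega
    rw [hrem, ih (i + 1) _ (by simp at h ⊢; omega)]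
    rw [List.flatMap_assoc]
    simp only [pvStep_eq]

-- ===== VERDICT (by name: the statement is the Claim_ definition above) =====
theorem sorted_k_partitions_spec : Claim_equal_sorted_k_partitions := by
  intro seq k _ _
  unfold Spec_sorted_k_partitions
  simp only [sorted_k_partitions, sorted_k_partitions_alt]
  rw [pvFrontier_inv k seq.length seq 0 [[]] (by simp)]
  simp
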